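-- pv_equiv track=rewrite | github.com/fhj414/one-click-watch-removal-assistant | apps/api/app/services/file_service.py | _detect_header_row
-- ===== SOURCE A (Python) =====
-- from typing import Any
--
-- def _detect_header_row(rows: list[list[Any]]) -> int:
--     search_rows = rows[: min(len(rows), 10)]
--     scored = [
--         (
--             sum(1 for value in row if str(value).strip()),
--             index,
--         )
--         for index, row in enumerate(search_rows)
--     ]
--     scored.sort(key=lambda item: (-item[0], item[1]))
--     return scored[0][1] if scored and scored[0][0] > 0 else 0
-- ===== SOURCE B (Python) =====
-- def _detect_header_row(rows):
--     best_count = 0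
--     best_index = 0
--     for index, row in enumerate(rows[:10]):
--         count = sum(1 for value in row if str(value).strip())
--         if count > best_count:
--             best_count = count
--             best_index = index
--     return best_index
-- ===== Notes on version B (the rewrite author's own statement) =====
-- stated objective: simpler
-- what changed: Replaces building a scored (count,index) list and sorting it by (-count,index) with a single-pass running maximum using a strict '>' so the earliest maximal row wins, as the stable sort does.
import Mathlib
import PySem

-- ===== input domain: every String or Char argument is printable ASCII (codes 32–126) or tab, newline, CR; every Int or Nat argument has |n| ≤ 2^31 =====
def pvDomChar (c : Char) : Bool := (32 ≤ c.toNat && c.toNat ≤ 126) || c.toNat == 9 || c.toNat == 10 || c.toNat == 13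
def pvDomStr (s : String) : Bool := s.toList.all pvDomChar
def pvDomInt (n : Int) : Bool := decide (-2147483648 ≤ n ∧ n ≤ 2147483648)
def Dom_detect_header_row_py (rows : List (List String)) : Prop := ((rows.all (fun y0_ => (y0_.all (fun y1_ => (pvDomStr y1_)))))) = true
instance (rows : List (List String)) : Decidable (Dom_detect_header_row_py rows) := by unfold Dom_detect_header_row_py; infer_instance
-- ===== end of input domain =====

-- B replaces A's build-scored-list-then-sort-by-(-count,index) with a single-pass running maximum
-- (strict '>' so the earliest maximal row wins, like the stable sort); same return value on all inputs.

-- shared helper: sum(1 for value in row if str(value).strip()) — both Pythons count the rows' non-blank cells this way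
def pvRowCount (row : List String) : Int :=
  ((row.countP (fun v => !(PySem.Str.strip v == ""))) : Int)

-- ===== PORT A =====
def detect_header_row_py (rows : List (List String)) : Int :=
  let searchRows := PySem.List.slice rows none (some (min (rows.length : Int) 10))
  let scored := (PySem.List.enumerate searchRows 0).map (fun p => (pvRowCount p.2, p.1))
  let scoredSorted := PySem.List.sorted2 scored (fun it => -it.1) (fun it => it.2)
  match scoredSorted with
  | [] => 0
  | (c, i) :: _ => if 0 < c then i else 0

-- ===== PORT B =====
def detect_header_row_py_alt (rows : List (List String)) : Int :=
  let best := (PySem.List.enumerate (PySem.List.slice rows none (some 10)) 0).foldl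
    (fun (best : Int × Int) p =>
      let count := pvRowCount p.2
      if best.1 < count then (count, p.1) else best)
    (0, 0)
  best.2

-- ===== PRECONDITION & SPEC =====
def Spec_detect_header_row_py (rows : List (List String)) (out : Int) : Prop := out = detect_header_row_py_alt rows
instance (rows : List (List String)) (out : Int) : Decidable (Spec_detect_header_row_py rows out) := by unfold Spec_detect_header_row_py; infer_instance

-- ===== CLAIM (what is proved, stated in full; the proofs are below) =====
def Claim_equal_detect_header_row_py : Prop := ∀ (rows : List (List String)), Dom_detect_header_row_py rows → Spec_detect_header_row_py rows (detect_header_row_py rows)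

-- ===== LEMMAS AND PROOFS =====

theorem pvRowCount_nonneg (row : List String) : 0 ≤ pvRowCount row := by
  unfold pvRowCount; exact Int.natCast_nonneg _

theorem insertBy_cons {α : Type} (before : α → α → Bool) (x h : α) (t : List α) :
    PySem.List.insertBy before x (h :: t)
      = if before x h then x :: h :: t else h :: PySem.List.insertBy before x t := rfl

-- head of an insertion sort's fold is the running "best" of the inserted elements
theorem foldl_insertBy_head {α : Type} (before : α → α → Bool) :
    ∀ (xs : List α) (b : α) (t : List α),
      ∃ t', xs.foldl (fun acc x => PySem.List.insertBy before x acc) (b :: t)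
            = (xs.foldl (fun b x => if before x b then x else b) b) :: t' := by
  intro xs
  induction xs with
  | nil => intro b t; exact ⟨t, rfl⟩
  | cons x xs ih =>
    intro b t
    simp only [List.foldl_cons, insertBy_cons]
    by_cases h : before x b = true
    · simp only [h, if_true]
      exact ih x (b :: t)
    · simp only [h, if_false, Bool.false_eq_true]
      exact ih b _

theorem mem_enumerate_fst_le {α : Type} (t : List α) (s : Int) :
    ∀ x ∈ PySem.List.enumerate t s, s ≤ x.1 := by
  intro x hx
  rcases (PySem.List.mem_enumerate_iff t s x).1 hx with ⟨k, hk, rfl⟩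
  simp

-- on elements whose index exceeds the accumulator's index, A's lex comparison collapses to "count is larger"
theorem fold_eq (e : List (Int × List String)) :
    ∀ (b : Int × Int),
      (∀ x ∈ e, b.2 < x.1) →
      e.Pairwise (fun p q : Int × List String => p.1 < q.1) →
      e.foldl (fun (acc : Int × Int) x =>
          if (decide (-(pvRowCount x.2) < -acc.1)
              || (!decide (-acc.1 < -(pvRowCount x.2)) && decide (x.1 < acc.2)))
          then (pvRowCount x.2, x.1) else acc) b
      = e.foldl (fun (best : Int × Int) p =>
          let count := pvRowCount p.2
          if best.1 < count then (count, p.1) else best) b := by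
  induction e with
  | nil => intro b _ _; rfl
  | cons x e ih =>
    intro b hb hp
    have hx : ¬ (x.1 < b.2) := by
      have := hb x (List.mem_cons_self)
      omega
    have hcond : (decide (-(pvRowCount x.2) < -b.1)
        || (!decide (-b.1 < -(pvRowCount x.2)) && decide (x.1 < b.2)))
        = decide (b.1 < pvRowCount x.2) := by
      have hd : decide (x.1 < b.2) = false := decide_eq_false hx
      rw [hd]
      simp only [Bool.and_false, Bool.or_false]
      congr 1
      exact propext ⟨fun h => by omega, fun h => by omega⟩
    rcases List.pairwise_cons.1 hp with ⟨hxe, hpe⟩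
    simp only [List.foldl_cons, hcond]
    by_cases hlt : b.1 < pvRowCount x.2
    · simp only [hlt, decide_true, if_true]
      exact ih (pvRowCount x.2, x.1) (fun y hy => hxe y hy) hpe
    · simp only [hlt, decide_false, if_false, Bool.false_eq_true]
      exact ih b (fun y hy => lt_trans (hb x List.mem_cons_self) (hxe y hy)) hpe

-- B's fold keeps a nonnegative best count, and index 0 while the best count is 0
theorem fold_pres (e : List (Int × List String)) :
    ∀ (b : Int × Int), 0 ≤ b.1 → (b.1 ≤ 0 → b.2 = 0) →
      0 ≤ (e.foldl (fun (best : Int × Int) p =>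
            let count := pvRowCount p.2
            if best.1 < count then (count, p.1) else best) b).1
      ∧ ((e.foldl (fun (best : Int × Int) p =>
            let count := pvRowCount p.2
            if best.1 < count then (count, p.1) else best) b).1 ≤ 0
          → (e.foldl (fun (best : Int × Int) p =>
            let count := pvRowCount p.2
            if best.1 < count then (count, p.1) else best) b).2 = 0) := by
  induction e with
  | nil => intro b h1 h2; exact ⟨h1, h2⟩
  | cons x e ih =>
    intro b h1 h2
    simp only [List.foldl_cons]
    by_cases hlt : b.1 < pvRowCount x.2
    · simp only [hlt, if_true]
      exact ih _ (le_of_lt (lt_of_le_of_lt h1 hlt)) (fun h => absurd h (by omega))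
    · simp only [hlt, if_false]
      exact ih b h1 h2

-- the core identity, stated on the common truncated row list
theorem main_eq (l : List (List String)) :
    (match PySem.List.sorted2 ((PySem.List.enumerate l 0).map (fun p => (pvRowCount p.2, p.1)))
        (fun it => -it.1) (fun it => it.2) with
      | [] => (0 : Int)
      | (c, i) :: _ => if 0 < c then i else 0)
    = ((PySem.List.enumerate l 0).foldl (fun (best : Int × Int) p =>
          let count := pvRowCount p.2
          if best.1 < count then (count, p.1) else best) (0, 0)).2 := by
  cases l with
  | nil => rfl
  | cons h t =>
    have henum : PySem.List.enumerate (h :: t) 0 = (0, h) :: PySem.List.enumerate t 1 := rfl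
    rw [henum]
    -- A side: sorted2 unfolds to a fold of insertBy; peel off the head insertion
    have hsorted : PySem.List.sorted2
        (((0, h) :: PySem.List.enumerate t 1).map (fun p => (pvRowCount p.2, p.1)))
        (fun it : Int × Int => -it.1) (fun it : Int × Int => it.2)
        = ((PySem.List.enumerate t 1).map (fun p => (pvRowCount p.2, p.1))).foldl
            (fun acc x => PySem.List.insertBy
              (fun a b : Int × Int => decide (-a.1 < -b.1) || (!decide (-b.1 < -a.1) && decide (a.2 < b.2)))
              x acc) [(pvRowCount h, 0)] := rfl
    obtain ⟨t', ht'⟩ := foldl_insertBy_head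
      (fun a b : Int × Int => decide (-a.1 < -b.1) || (!decide (-b.1 < -a.1) && decide (a.2 < b.2)))
      ((PySem.List.enumerate t 1).map (fun p => (pvRowCount p.2, p.1))) (pvRowCount h, 0) []
    rw [hsorted, ht']
    -- the head's running best equals B's fold over the same enumeration
    rw [List.foldl_map]
    have hfold := fold_eq (PySem.List.enumerate t 1) (pvRowCount h, 0)
      (fun x hx => lt_of_lt_of_le (by norm_num) (mem_enumerate_fst_le t 1 x hx))
      (PySem.List.pairwise_lt_enumerate t 1)
    rw [hfold]
    -- B's first step turns (0,0) into (pvRowCount h, 0)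
    have hstep : (((0, h) :: PySem.List.enumerate t 1).foldl (fun (best : Int × Int) p =>
          let count := pvRowCount p.2
          if best.1 < count then (count, p.1) else best) ((0 : Int), (0 : Int)))
        = (PySem.List.enumerate t 1).foldl (fun (best : Int × Int) p =>
          let count := pvRowCount p.2
          if best.1 < count then (count, p.1) else best) (pvRowCount h, 0) := by
      simp only [List.foldl_cons]
      congr 1
      by_cases h0 : (0 : Int) < pvRowCount h
      · simp [h0]
      · have : pvRowCount h = 0 := le_antisymm (by omega) (pvRowCount_nonneg h)
        simp [this]
    rw [hstep]
    -- the guard "if 0 < best count" is the identity on the best index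
    obtain ⟨hp1, hp2⟩ := fold_pres (PySem.List.enumerate t 1) (pvRowCount h, 0)
      (pvRowCount_nonneg h) (fun _ => rfl)
    by_cases hc : 0 < ((PySem.List.enumerate t 1).foldl (fun (best : Int × Int) p =>
          let count := pvRowCount p.2
          if best.1 < count then (count, p.1) else best) (pvRowCount h, 0)).1
    · simp [hc]
    · simp only [hc, if_false]
      exact (hp2 (by omega)).symm

-- ===== VERDICT (by name: the statement is the Claim_ definition above) =====
theorem detect_header_row_py_spec : Claim_equal_detect_header_row_py := by
  intro rows _
  unfold Spec_detect_header_row_py detect_header_row_py detect_header_row_py_alt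
  have hA : PySem.List.slice rows none (some (min (rows.length : Int) 10)) = rows.take 10 := by
    have h := PySem.List.slice_to rows (show (0:Int) ≤ min (rows.length : Int) 10 by omega)
    rw [h]
    have h2 : (min (rows.length : Int) 10).toNat = min rows.length 10 := by omega
    rw [h2, ← List.take_take]
    exact List.take_of_length_le (by simp)
  have hB : PySem.List.slice rows none (some (10 : Int)) = rows.take 10 := by
    have : ((10 : Nat) : Int) = (10 : Int) := by norm_num
    rw [← this, PySem.List.slice_to_natCast]
  simp only [hA, hB]
  exact main_eq (rows.take 10)
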